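-- pv_equiv track=rewrite | github.com/ResonanceEnergy/DUBFORGE | make_template.py | resolve_arrangement
-- ===== SOURCE A (Python) =====
-- def resolve_arrangement(cfg: dict) -> list[dict]:
--     """Add cumulative bar_start to each section."""
--     sections = cfg["arrangement"]
--     bar_offset = 0
--     resolved = []
--     for sec in sections:
--         s = dict(sec)
--         s["bar_start"] = bar_offset
--         bar_offset += s["bars"]
--         resolved.append(s)
--     return resolved
-- ===== SOURCE B (Python) =====
-- def resolve_arrangement(cfg: dict) -> list[dict]:
--     """Add bar_start to each section: section i's offset is the sum of the
--     'bars' of all preceding sections (per-index closed form, no accumulator)."""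
--     secs = cfg["arrangement"]
--     return [{**sec, "bar_start": sum(s["bars"] for s in secs[:i])}
--             for i, sec in enumerate(secs)]
-- ===== Notes on version B (the rewrite author's own statement) =====
-- stated objective: alternative
-- what changed: Drops the running accumulator entirely: each section's bar_start is computed independently as a per-index closed form, the sum of the bars of its preceding slice secs[:i], in a single enumerate comprehension.
import Mathlib
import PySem

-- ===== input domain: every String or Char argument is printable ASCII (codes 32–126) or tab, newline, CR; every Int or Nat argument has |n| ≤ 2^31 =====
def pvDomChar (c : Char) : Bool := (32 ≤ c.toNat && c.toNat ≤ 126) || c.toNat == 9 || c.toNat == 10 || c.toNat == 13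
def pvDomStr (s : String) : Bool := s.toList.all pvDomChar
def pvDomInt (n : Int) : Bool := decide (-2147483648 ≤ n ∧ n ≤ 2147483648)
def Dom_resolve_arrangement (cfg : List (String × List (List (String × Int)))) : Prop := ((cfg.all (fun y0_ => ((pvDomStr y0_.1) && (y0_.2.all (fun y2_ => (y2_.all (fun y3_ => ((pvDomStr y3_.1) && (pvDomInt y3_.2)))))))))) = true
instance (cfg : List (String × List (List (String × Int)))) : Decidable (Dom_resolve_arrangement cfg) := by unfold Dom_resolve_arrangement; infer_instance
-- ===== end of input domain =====

-- B replaces A's running-accumulator loop by a per-index closed form: each section's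
-- bar_start is the sum of the bars of its preceding slice (objective: alternative, not faster).

-- ===== PORT A =====
-- A's loop: state (bar_offset, resolved); dict(sec) → Dict.ofList; s["bar_start"] = off → insert;
-- s["bars"] read via getD (KeyError cases excluded by Pre_); resolved dicts returned as item lists.
def resolve_arrangement (cfg : List (String × List (List (String × Int)))) : List (List (String × Int)) :=
  match (PySem.Dict.ofList cfg).get? "arrangement" with
  | none => []   -- KeyError: excluded by Pre_
  | some sections =>
    (sections.foldl
      (fun (st : Int × List (List (String × Int))) sec =>
        let s := (PySem.Dict.ofList sec).insert "bar_start" st.1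
        (st.1 + s.getD "bars" 0, st.2 ++ [s.items]))
      ((0 : Int), [])).2

-- ===== PORT B =====
-- [{**sec, "bar_start": sum(s["bars"] for s in secs[:i])} for i, sec in enumerate(secs)]
-- sum(gen) → (·.map …).sum; s["bars"] via getD (KeyError excluded by Pre_).
def resolve_arrangement_alt (cfg : List (String × List (List (String × Int)))) : List (List (String × Int)) :=
  match (PySem.Dict.ofList cfg).get? "arrangement" with
  | none => []   -- KeyError: excluded by Pre_
  | some secs =>
    (PySem.List.enumerate secs).map (fun p =>
      ((PySem.Dict.ofList p.2).insert "bar_start"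
        (((PySem.List.slice secs none (some p.1)).map
            (fun s => (PySem.Dict.ofList s).getD "bars" 0)).sum)).items)

-- ===== PRECONDITION & SPEC =====
-- Pre_ excludes exactly the KeyError inputs of A: cfg without an "arrangement" key,
-- and sections without a "bars" key.
def Pre_resolve_arrangement (cfg : List (String × List (List (String × Int)))) : Prop :=
  (PySem.Dict.ofList cfg).contains "arrangement" = true ∧
  ∀ sec ∈ (PySem.Dict.ofList cfg).getD "arrangement" [],
    (PySem.Dict.ofList sec).contains "bars" = true
instance (cfg : List (String × List (List (String × Int)))) : Decidable (Pre_resolve_arrangement cfg) := by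
  unfold Pre_resolve_arrangement; infer_instance

def pvWitness_resolve_arrangement : (List (String × List (List (String × Int)))) :=
  [("arrangement", [[("bars", 4)], [("bars", 2), ("name", 0)]])]

def Spec_resolve_arrangement (cfg : List (String × List (List (String × Int)))) (out : List (List (String × Int))) : Prop := out = resolve_arrangement_alt cfg
instance (cfg : List (String × List (List (String × Int)))) (out : List (List (String × Int))) : Decidable (Spec_resolve_arrangement cfg out) := by unfold Spec_resolve_arrangement; infer_instance

-- ===== CLAIM =====
def Claim_equal_resolve_arrangement : Prop := ∀ (cfg : List (String × List (List (String × Int)))), Dom_resolve_arrangement cfg → Pre_resolve_arrangement cfg → Spec_resolve_arrangement cfg (resolve_arrangement cfg)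

-- ===== LEMMAS AND PROOFS =====

-- recursive characterisation of A's loop result
def pvGo (off : Int) : List (List (String × Int)) → List (List (String × Int))
  | [] => []
  | sec :: rest =>
    ((PySem.Dict.ofList sec).insert "bar_start" off).items ::
      pvGo (off + (PySem.Dict.ofList sec).getD "bars" 0) rest

def pvC (s : List (String × Int)) : Int := (PySem.Dict.ofList s).getD "bars" 0

lemma pvA_fold (secs : List (List (String × Int))) :
    ∀ (off : Int) (acc : List (List (String × Int))),
    (secs.foldl
      (fun (st : Int × List (List (String × Int))) sec =>
        let s := (PySem.Dict.ofList sec).insert "bar_start" st.1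
        (st.1 + s.getD "bars" 0, st.2 ++ [s.items]))
      (off, acc)).2 = acc ++ pvGo off secs := by
  induction secs with
  | nil => intro off acc; simp [pvGo]
  | cons sec rest ih =>
    intro off acc
    simp only [List.foldl_cons, pvGo, ih]
    rw [PySem.Dict.getD_insert_of_ne _ _ _ (by decide : ("bars" : String) ≠ "bar_start")]
    simp

lemma pvGo_length (secs : List (List (String × Int))) :
    ∀ off, (pvGo off secs).length = secs.length := by
  induction secs with
  | nil => intro off; simp [pvGo]
  | cons sec rest ih => intro off; simp [pvGo, ih]

lemma pvGo_getElem (secs : List (List (String × Int))) :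
    ∀ (off : Int) (i : Nat) (h : i < secs.length),
    (pvGo off secs)[i]'(by rw [pvGo_length]; exact h) =
      ((PySem.Dict.ofList secs[i]).insert "bar_start"
        (off + ((secs.take i).map pvC).sum)).items := by
  induction secs with
  | nil => intro off i h; simp at h
  | cons sec rest ih =>
    intro off i h
    cases i with
    | zero => simp [pvGo]
    | succ j =>
      have hj : j < rest.length := by simpa using h
      simp only [pvGo, List.getElem_cons_succ, ih _ j hj, List.take_succ_cons,
        List.map_cons, List.sum_cons]
      have : off + (PySem.Dict.ofList sec).getD "bars" 0 +
          (List.map pvC (List.take j rest)).sum =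
          off + (pvC sec + (List.map pvC (List.take j rest)).sum) := by
        unfold pvC; ring
      rw [this]

-- ===== VERDICT =====
theorem resolve_arrangement_spec : Claim_equal_resolve_arrangement := by
  intro cfg _ _
  unfold Spec_resolve_arrangement resolve_arrangement resolve_arrangement_alt
  cases h : (PySem.Dict.ofList cfg).get? "arrangement" with
  | none => rfl
  | some secs =>
    simp only [pvA_fold, List.nil_append]
    apply List.ext_getElem
    · simp [pvGo_length, PySem.List.length_enumerate]
    · intro i h1 h2
      have hi : i < secs.length := by rw [pvGo_length] at h1; exact h1
      rw [pvGo_getElem secs 0 i hi]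
      simp only [List.getElem_map, PySem.List.getElem_enumerate]
      rw [show ((0 : Int) + (i : Int)) = ((i : Nat) : Int) by omega,
        PySem.List.slice_to_natCast]
      simp only [List.map_take, zero_add]
      rfl
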